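-- pv_equiv track=rewrite | github.com/vtheenby/aoc2019 | days/d04.py | checkDouble
-- ===== SOURCE A (Python) =====
-- def checkDouble(l):
-- 	ans = []
-- 	count = 1
-- 	for i in range(len(l) - 1):
-- 		if l[i] == l[i + 1]:
-- 			count += 1
-- 		else:
-- 			ans.append(count)
-- 			count = 1
-- 	ans.append(count)
-- 	for i in ans:
-- 		if i is 2:
-- 			return (True)
-- 	return (False)
-- ===== SOURCE B (Python) =====
-- def checkDouble(l):
--     n = len(l)
--     for i in range(n - 1):
--         if l[i] == l[i + 1] and (i == 0 or l[i - 1] != l[i]) and (i + 2 == n or l[i + 2] != l[i + 1]):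
--             return True
--     return False
-- ===== Notes on version B (the rewrite author's own statement) =====
-- stated objective: alternative
-- what changed: B drops A's run-length accumulator list entirely and instead scans once for an isolated adjacent pair, testing only a local 4-element window (pair equal, left neighbour absent/different, right neighbour absent/different) with an early return; same O(n) scan but no list building (measured constant-factor speedup).
import Mathlib
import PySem

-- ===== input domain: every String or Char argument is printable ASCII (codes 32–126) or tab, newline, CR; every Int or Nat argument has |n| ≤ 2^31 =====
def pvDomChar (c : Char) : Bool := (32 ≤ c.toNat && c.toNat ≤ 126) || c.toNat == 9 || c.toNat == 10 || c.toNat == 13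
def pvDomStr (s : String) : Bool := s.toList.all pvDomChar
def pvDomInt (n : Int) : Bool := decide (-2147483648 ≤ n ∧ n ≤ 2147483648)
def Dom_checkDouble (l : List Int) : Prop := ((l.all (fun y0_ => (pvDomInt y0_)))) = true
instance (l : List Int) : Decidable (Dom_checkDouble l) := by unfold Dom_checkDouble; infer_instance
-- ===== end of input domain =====

-- B replaces A's run-length accumulator list by a single local-window scan for an
-- isolated adjacent pair (alternative decomposition, O(1) extra space; return value only).

-- ===== PORT A =====
-- Literal port of A: fold over range(len(l)-1) carrying (ans, count); 'i is 2' on these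
-- small ints built by increment behaves as '== 2' in CPython, ported as such.
def checkDouble (l : List Int) : Bool :=
  let st := (PySem.List.pyRange 0 ((l.length : Int) - 1) 1).foldl
    (fun (s : List Int × Int) i =>
      if PySem.List.pyGetD l i 0 = PySem.List.pyGetD l (i + 1) 0 then (s.1, s.2 + 1)
      else (s.1 ++ [s.2], 1))
    ([], 1)
  let ans := st.1 ++ [st.2]
  ans.any (fun i => i == 2)

-- ===== PORT B =====
def checkDouble_alt (l : List Int) : Bool :=
  (PySem.List.pyRange 0 ((l.length : Int) - 1) 1).any (fun i =>
    (PySem.List.pyGetD l i 0 == PySem.List.pyGetD l (i + 1) 0) &&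
    ((i == 0) || (PySem.List.pyGetD l (i - 1) 0 != PySem.List.pyGetD l i 0)) &&
    ((i + 2 == (l.length : Int)) || (PySem.List.pyGetD l (i + 2) 0 != PySem.List.pyGetD l (i + 1) 0)))

-- ===== PRECONDITION & SPEC =====
def Spec_checkDouble (l : List Int) (out : Bool) : Prop := out = checkDouble_alt l
instance (l : List Int) (out : Bool) : Decidable (Spec_checkDouble l out) := by unfold Spec_checkDouble; infer_instance

-- ===== CLAIM (what is proved, stated in full; the proofs are below) =====
def Claim_equal_checkDouble : Prop := ∀ (l : List Int), Dom_checkDouble l → Spec_checkDouble l (checkDouble l)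

-- ===== LEMMAS AND PROOFS =====
-- structural counterpart of A's fold: accumulate run lengths
def goA (ans : List Int) (c x : Int) : List Int → List Int × Int
  | [] => (ans, c)
  | y :: t => if x = y then goA ans (c + 1) y t else goA (ans ++ [c]) 1 y t

-- structural "some run has length 2" with current element x and its run length c
def aGo (x c : Int) : List Int → Bool
  | [] => c == 2
  | y :: t => if x = y then aGo y (c + 1) t else (c == 2) || aGo y 1 t

def headNe (y : Int) : List Int → Bool
  | [] => true
  | z :: _ => z != y

-- structural counterpart of B: nr = "head starts a new run"
def bGo : Bool → List Int → Bool
  | _, [] => false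
  | _, [_] => false
  | nr, x :: y :: t => ((x == y) && nr && headNe y t) || bGo (x != y) (y :: t)

def fA (l : List Int) (s : List Int × Int) (k : Nat) : List Int × Int :=
  if l.getD k 0 = l.getD (k + 1) 0 then (s.1, s.2 + 1) else (s.1 ++ [s.2], 1)

def W (l : List Int) (nr : Bool) (k : Nat) : Bool :=
  (l.getD k 0 == l.getD (k + 1) 0) &&
  (if k = 0 then nr else (l.getD (k - 1) 0 != l.getD k 0)) &&
  (decide (k + 2 = l.length) || (l.getD (k + 2) 0 != l.getD (k + 1) 0))


theorem fA_shift (a : Int) (l : List Int) (s : List Int × Int) (k : Nat) :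
    fA (a :: l) s (k + 1) = fA l s k := by
  simp [fA]

theorem fA_zero (a b : Int) (l : List Int) (s : List Int × Int) :
    fA (a :: b :: l) s 0 = if a = b then (s.1, s.2 + 1) else (s.1 ++ [s.2], 1) := by
  simp [fA]

theorem lemA_idx (t : List Int) (x : Int) (ans : List Int) (c : Int) :
    (List.range ((x :: t).length - 1)).foldl (fA (x :: t)) (ans, c) = goA ans c x t := by
  induction t generalizing x ans c with
  | nil => simp [goA]
  | cons y t' ih =>
    simp only [List.length_cons, Nat.add_sub_cancel, List.range_succ_eq_map,
      List.foldl_cons, List.foldl_map, fA_shift, fA_zero]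
    by_cases h : x = y
    · rw [if_pos h]
      have := ih y ans (c + 1)
      simp only [List.length_cons, Nat.add_sub_cancel] at this
      rw [this, goA, if_pos h]
    · rw [if_neg h]
      have := ih y (ans ++ [c]) 1
      simp only [List.length_cons, Nat.add_sub_cancel] at this
      rw [this, goA, if_neg h]

theorem lemA_collapse (t : List Int) (x : Int) (ans : List Int) (c : Int) :
    ((goA ans c x t).1 ++ [(goA ans c x t).2]).any (fun i => i == 2)
      = (ans.any (fun i => i == 2) || aGo x c t) := by
  induction t generalizing x ans c with
  | nil => simp [goA, aGo]
  | cons y t' ih =>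
    simp only [goA, aGo]
    by_cases h : x = y
    · simp only [if_pos h]; exact ih y ans (c + 1)
    · simp only [if_neg h]
      rw [ih y (ans ++ [c]) 1]
      simp [Bool.or_assoc]

theorem W_shift (a b : Int) (l : List Int) (nr : Bool) (k : Nat) :
    W (a :: b :: l) nr (k + 1) = W (b :: l) (a != b) k := by
  cases k with
  | zero => simp [W]
  | succ j => simp [W]

theorem W_zero (x y : Int) (t : List Int) (nr : Bool) :
    W (x :: y :: t) nr 0 = ((x == y) && nr && headNe y t) := by
  cases t with
  | nil => simp [W, headNe]
  | cons z r =>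
    simp [W, headNe]

theorem lemB_idx (t : List Int) (x : Int) (nr : Bool) :
    (List.range ((x :: t).length - 1)).any (W (x :: t) nr) = bGo nr (x :: t) := by
  induction t generalizing x nr with
  | nil => simp [bGo]
  | cons y t' ih =>
    simp only [List.length_cons, Nat.add_sub_cancel, List.range_succ_eq_map,
      List.any_cons, List.any_map]
    have hsh : (fun k => W (x :: y :: t') nr (k + 1)) = W (y :: t') (x != y) := by
      funext k; exact W_shift x y t' nr k
    rw [W_zero]
    have := ih y (x != y)
    simp only [List.length_cons, Nat.add_sub_cancel] at this
    simp only [Function.comp_def, hsh, this]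
    rw [bGo]

theorem aGo_bGo (t : List Int) (x c : Int) (hc : 1 ≤ c) :
    aGo x c t = (((c == 2) && headNe x t) || bGo (c == 1) (x :: t)) := by
  induction t generalizing x c with
  | nil => simp [aGo, bGo, headNe]
  | cons y t' ih =>
    by_cases h : x = y
    · subst h
      simp only [aGo, bGo]
      rw [ih x (c + 1) (by omega)]
      have e1 : ((c + 1 : Int) == 2) = (c == 1) := by
        by_cases hc2 : c = 1
        · subst hc2; decide
        · have hne : (c + 1 : Int) ≠ 2 := by omega
          simp [hc2, hne]
      have e2 : ((c + 1 : Int) == 1) = false := by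
        have hne : (c + 1 : Int) ≠ 1 := by omega
        simp [hne]
      simp [headNe, e1, e2]
    · have h' : y ≠ x := fun e => h e.symm
      simp only [aGo, if_neg h, bGo]
      rw [ih y 1 (by omega)]
      have h1 : (x == y) = false := beq_eq_false_iff_ne.mpr h
      have h2 : (y == x) = false := beq_eq_false_iff_ne.mpr h'
      simp [headNe, bne, h1, h2]

theorem bridgeA (l : List Int) :
    checkDouble l = (((List.range (l.length - 1)).foldl (fA l) ([], 1)).1.any (fun i => i == 2)
      || (((List.range (l.length - 1)).foldl (fA l) ([], 1)).2 == 2)) := by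
  unfold checkDouble
  rw [PySem.List.pyRange_one]
  have ht : ((l.length : Int) - 1 - 0).toNat = l.length - 1 := by omega
  rw [ht]
  have hs : ∀ (k : Nat), ((k : Int) + 1) = ((k + 1 : Nat) : Int) := by intro k; push_cast; ring
  simp only [List.foldl_map, zero_add, hs, PySem.List.pyGetD_natCast,
    List.any_append, List.any_cons, List.any_nil, Bool.or_false]
  rfl

theorem bridgeB (l : List Int) :
    checkDouble_alt l = (List.range (l.length - 1)).any (W l true) := by
  unfold checkDouble_alt
  rw [PySem.List.pyRange_one]
  have ht : ((l.length : Int) - 1 - 0).toNat = l.length - 1 := by omega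
  rw [ht]
  simp only [List.any_map, zero_add]
  congr 1
  funext k
  cases k with
  | zero =>
    have H5 : ((2 : Int) == (l.length : Int)) = decide (2 = l.length) := by
      by_cases hL : 2 = l.length
      · have hL2 : (2 : Int) = (l.length : Int) := by omega
        simp [hL, hL2]
      · have hL2 : (2 : Int) ≠ (l.length : Int) := by omega
        simp [hL, hL2]
    have G0 : PySem.List.pyGetD l (0 : Int) 0 = l.getD 0 0 := by
      rw [show (0 : Int) = ((0 : Nat) : Int) by norm_num, PySem.List.pyGetD_natCast]
    have G1 : PySem.List.pyGetD l (1 : Int) 0 = l.getD 1 0 := by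
      rw [show (1 : Int) = ((1 : Nat) : Int) by norm_num, PySem.List.pyGetD_natCast]
    have G2 : PySem.List.pyGetD l (2 : Int) 0 = l.getD 2 0 := by
      rw [show (2 : Int) = ((2 : Nat) : Int) by norm_num, PySem.List.pyGetD_natCast]
    simp [W, H5, G0, G1, G2]
  | succ j =>
    have E0 : (((j : Int) + 1) == 0) = false := by
      simp only [beq_eq_false_iff_ne]; omega
    have ELen : (((j : Int) + 1 + 2) == (l.length : Int)) = decide (j + 1 + 2 = l.length) := by
      by_cases hL : j + 1 + 2 = l.length
      · have hL2 : ((j : Int) + 1 + 2) = (l.length : Int) := by omega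
        simp [hL, hL2]
      · have hL2 : ((j : Int) + 1 + 2) ≠ (l.length : Int) := by omega
        simp [hL, hL2]
    have E1 : PySem.List.pyGetD l ((j : Int) + 1) 0 = l.getD (j + 1) 0 := by
      rw [show ((j : Int) + 1) = ((j + 1 : Nat) : Int) by push_cast; ring, PySem.List.pyGetD_natCast]
    have E2 : PySem.List.pyGetD l ((j : Int) + 1 + 1) 0 = l.getD (j + 1 + 1) 0 := by
      rw [show ((j : Int) + 1 + 1) = ((j + 1 + 1 : Nat) : Int) by push_cast; ring, PySem.List.pyGetD_natCast]
    have E3 : PySem.List.pyGetD l ((j : Int) + 1 + 2) 0 = l.getD (j + 1 + 2) 0 := by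
      rw [show ((j : Int) + 1 + 2) = ((j + 1 + 2 : Nat) : Int) by push_cast; ring, PySem.List.pyGetD_natCast]
    simp [W, E0, ELen, E1, E2, E3]


-- ===== VERDICT (by name: the statement is the Claim_ definition above) =====
theorem checkDouble_spec : Claim_equal_checkDouble := by
  intro l _
  unfold Spec_checkDouble
  cases l with
  | nil => decide
  | cons x t =>
    rw [bridgeA, bridgeB, lemB_idx t x true, lemA_idx t x [] 1]
    have hco := lemA_collapse t x [] 1
    simp only [List.any_append, List.any_cons, List.any_nil, Bool.or_false,
      Bool.false_or] at hco
    rw [hco, aGo_bGo t x 1 (by omega)]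
    norm_num
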